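-- pv_equiv track=rewrite | github.com/zznidar/OP2021 | vaje/DN4/plesalci.py | brez_para
-- ===== SOURCE A (Python) =====
-- def par(prvi, drugi, erlaubt):
--     # identifikacijska številka, ime, nivo znanja, spol
--     if(prvi[3] != drugi[3] and abs(prvi[2] - drugi[2]) <= erlaubt):
--         return((prvi[0], drugi[0]) if prvi[0] < drugi[0] else (drugi[0], prvi[0]))
--
-- def brez_para(plesalci, erlaubt):
--     imaPar = set()
--     vsi = set(plesalci.keys())
--     p = list(plesalci.items())
--     for i in range(len(p)):
--         for let_i in p[i+1:]:
--             parus = par([p[i][0], *p[i][1]], [let_i[0], *let_i[1]], erlaubt) # ker znotraj terke ne moremo spreadati, pac naredimo list :shrug: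
--             if(parus):
--                 imaPar.add(p[i][0])
--                 imaPar.add(let_i[0])
--     return(vsi - imaPar)
-- ===== SOURCE B (Python) =====
-- # B: sort levels globally and per sex once, then answer each dancer by binary
-- # search: a dancer has a partner iff the count of levels within erlaubt of his
-- # differs between "all dancers" and "dancers of his own sex". O(n log n).
--
-- def _bisect_left(a, x):
--     lo, hi = 0, len(a)
--     while lo < hi:
--         mid = (lo + hi) // 2
--         if a[mid] < x:
--             lo = mid + 1
--         else:
--             hi = mid
--     return lo
--
-- def _bisect_right(a, x):
--     lo, hi = 0, len(a)
--     while lo < hi: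
--         mid = (lo + hi) // 2
--         if x < a[mid]:
--             hi = mid
--         else:
--             lo = mid + 1
--     return lo
--
-- def brez_para(plesalci, erlaubt):
--     if erlaubt < 0:
--         return set(plesalci.keys())
--     lvls = sorted(nivo for (_, nivo, _) in plesalci.values())
--     pairs = [(spol, nivo) for (_, nivo, spol) in plesalci.values()]
--     by_sex = {}
--     for spol, nivo in pairs:
--         by_sex.setdefault(spol, []).append(nivo)
--     by_sex = {s: sorted(l) for s, l in by_sex.items()}
--     res = []
--     for idn, (_, nivo, spol) in plesalci.items():
--         lo, hi = nivo - erlaubt, nivo + erlaubt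
--         total = _bisect_right(lvls, hi) - _bisect_left(lvls, lo)
--         sl = by_sex[spol]
--         same = _bisect_right(sl, hi) - _bisect_left(sl, lo)
--         if total == same:
--             res.append(idn)
--     return set(res)
-- ===== Notes on version B (the rewrite author's own statement) =====
-- stated objective: faster
-- what changed: A compares every pair of dancers (O(n^2)); B sorts the levels once (globally and per sex) and binary-searches the window [nivo-erlaubt, nivo+erlaubt] for each dancer, declaring a dancer partnerless iff the window holds no level of the opposite sex (count over all = count over own sex).
import Mathlib
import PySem

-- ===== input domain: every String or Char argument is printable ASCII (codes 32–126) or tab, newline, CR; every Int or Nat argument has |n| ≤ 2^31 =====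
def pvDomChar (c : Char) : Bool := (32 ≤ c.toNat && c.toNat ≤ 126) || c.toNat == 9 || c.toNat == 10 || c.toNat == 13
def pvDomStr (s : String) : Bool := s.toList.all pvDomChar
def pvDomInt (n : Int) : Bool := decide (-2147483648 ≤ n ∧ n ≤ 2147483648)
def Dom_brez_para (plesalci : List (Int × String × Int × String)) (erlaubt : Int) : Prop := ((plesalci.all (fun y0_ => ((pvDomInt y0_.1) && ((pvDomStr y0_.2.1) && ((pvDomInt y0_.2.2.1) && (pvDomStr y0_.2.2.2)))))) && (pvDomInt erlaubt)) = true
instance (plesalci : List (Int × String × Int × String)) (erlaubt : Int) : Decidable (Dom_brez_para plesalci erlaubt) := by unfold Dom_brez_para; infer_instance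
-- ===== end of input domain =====

-- B replaces A's all-pairs scan by sorting the levels (globally and per sex) once and
-- binary-searching the window [nivo-erlaubt, nivo+erlaubt] for each dancer.

-- ===== PORT A =====
-- par(prvi, drugi, erlaubt): prvi/drugi are (id, ime, nivo, spol); returns the ordered id pair or None
def pvPar (prvi drugi : Int × String × Int × String) (erlaubt : Int) : Option (Int × Int) :=
  if prvi.2.2.2 ≠ drugi.2.2.2 ∧ |prvi.2.2.1 - drugi.2.2.1| ≤ erlaubt then
    some (if prvi.1 < drugi.1 then (prvi.1, drugi.1) else (drugi.1, prvi.1))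
  else none

-- the double loop building imaPar: for i in range(len(p)): for let_i in p[i+1:]: …
def pvImaPar (p : List (Int × String × Int × String)) (erlaubt : Int) : PySem.Set Int :=
  (PySem.List.pyRange 0 (p.length : Int) 1).foldl (fun s i =>
    let pi := PySem.List.pyGetD p i (0, "", 0, "")
    (PySem.List.slice p (some (i + 1)) none).foldl (fun s leti =>
      if (pvPar pi leti erlaubt).isSome then PySem.Set.add (PySem.Set.add s pi.1) leti.1 else s) s)
    PySem.Set.empty

def brez_para (plesalci : List (Int × String × Int × String)) (erlaubt : Int) : List Int :=
  -- the assoc list IS the dict: p = list(plesalci.items()), vsi = set(plesalci.keys())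
  let vsi : PySem.Set Int := PySem.Set.ofList (plesalci.map (fun e => e.1))
  PySem.Set.diff vsi (pvImaPar plesalci erlaubt)

-- ===== PORT B =====
-- _bisect_left/_bisect_right in Source B are the textbook binary-search loops; the prelude
-- owns exactly those loops as PySem.List.bisectLeft / bisectRight, so they port to them.
-- pairs = [(spol, nivo) …]; the by_sex grouping loop (setdefault/append = modify with ++[v])
def pvBySex0 (p : List (Int × String × Int × String)) : PySem.Dict String (List Int) :=
  (p.map (fun e => (e.2.2.2, e.2.2.1))).foldl
    (fun d q => d.modify q.1 [] (fun l => l ++ [q.2])) PySem.Dict.empty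

-- by_sex = {s: sorted(l) for s, l in by_sex.items()}
def pvBySex (p : List (Int × String × Int × String)) : PySem.Dict String (List Int) :=
  (pvBySex0 p).items.foldl
    (fun d q => d.insert q.1 (PySem.List.sorted q.2 (fun x => x) false)) PySem.Dict.empty

def brez_para_alt (plesalci : List (Int × String × Int × String)) (erlaubt : Int) : List Int :=
  if erlaubt < 0 then PySem.Set.ofList (plesalci.map (fun e => e.1)) else
  let lvls := PySem.List.sorted (plesalci.map (fun e => e.2.2.1)) (fun x => x) false
  let res : List Int := plesalci.foldl (fun r e =>
    let lo := e.2.2.1 - erlaubt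
    let hi := e.2.2.1 + erlaubt
    let total : Int := (PySem.List.bisectRight lvls hi : Int) - (PySem.List.bisectLeft lvls lo : Int)
    let sl := (pvBySex plesalci).getD e.2.2.2 []
    let same : Int := (PySem.List.bisectRight sl hi : Int) - (PySem.List.bisectLeft sl lo : Int)
    if total == same then r ++ [e.1] else r) []
  PySem.Set.ofList res

-- ===== PRECONDITION & SPEC =====
-- The Python argument is a dict, so its key list is duplicate-free by construction; a
-- Lean list with duplicate ids corresponds to no Python input and is excluded.
def Pre_brez_para (plesalci : List (Int × String × Int × String)) (erlaubt : Int) : Prop :=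
  (plesalci.map (fun e => e.1)).Nodup
instance (plesalci : List (Int × String × Int × String)) (erlaubt : Int) : Decidable (Pre_brez_para plesalci erlaubt) := by unfold Pre_brez_para; infer_instance

def pvWitness_brez_para : (List (Int × String × Int × String)) × Int :=
  ([(1, "ana", 3, "F"), (2, "bor", 5, "M"), (3, "cene", 9, "M")], 2)

def Spec_brez_para (plesalci : List (Int × String × Int × String)) (erlaubt : Int) (out : List Int) : Prop := out = brez_para_alt plesalci erlaubt
instance (plesalci : List (Int × String × Int × String)) (erlaubt : Int) (out : List Int) : Decidable (Spec_brez_para plesalci erlaubt out) := by unfold Spec_brez_para; infer_instance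

-- ===== CLAIM (what is proved, stated in full; the proofs are below) =====
def Claim_equal_brez_para : Prop := ∀ (plesalci : List (Int × String × Int × String)) (erlaubt : Int), Dom_brez_para plesalci erlaubt → Pre_brez_para plesalci erlaubt → Spec_brez_para plesalci erlaubt (brez_para plesalci erlaubt)

-- ===== LEMMAS AND PROOFS =====

theorem pvPar_isSome_iff (a b : Int × String × Int × String) (er : Int) :
    (pvPar a b er).isSome = true ↔ (a.2.2.2 ≠ b.2.2.2 ∧ |a.2.2.1 - b.2.2.1| ≤ er) := by
  by_cases h : a.2.2.2 ≠ b.2.2.2 ∧ |a.2.2.1 - b.2.2.1| ≤ er <;> simp [pvPar, h]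

theorem pvPar_isSome_symm (a b : Int × String × Int × String) (er : Int) :
    (pvPar b a er).isSome = (pvPar a b er).isSome := by
  rw [Bool.eq_iff_iff, pvPar_isSome_iff, pvPar_isSome_iff, abs_sub_comm, ne_comm]

theorem innerMem (l : List (Int × String × Int × String)) (er : Int) (a : Int × String × Int × String) (s : PySem.Set Int) (x : Int) :
    x ∈ l.foldl (fun s q => if (pvPar a q er).isSome then PySem.Set.add (PySem.Set.add s a.1) q.1 else s) s
      ↔ x ∈ s ∨ ∃ q ∈ l, (pvPar a q er).isSome ∧ (x = a.1 ∨ x = q.1) := by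
  induction l generalizing s with
  | nil => simp
  | cons b t ih =>
    simp only [List.foldl_cons]
    by_cases hb : (pvPar a b er).isSome
    · rw [if_pos hb, ih]
      simp only [PySem.Set.mem_add, List.mem_cons]
      constructor
      · rintro (((h | h) | h) | ⟨q, hq, hp, hx⟩)
        · exact Or.inl h
        · exact Or.inr ⟨b, Or.inl rfl, hb, Or.inl h⟩
        · exact Or.inr ⟨b, Or.inl rfl, hb, Or.inr h⟩
        · exact Or.inr ⟨q, Or.inr hq, hp, hx⟩
      · rintro (h | ⟨q, rfl | hq, hp, hx⟩)
        · exact Or.inl (Or.inl (Or.inl h))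
        · rcases hx with h | h
          · exact Or.inl (Or.inl (Or.inr h))
          · exact Or.inl (Or.inr h)
        · exact Or.inr ⟨q, hq, hp, hx⟩
    · rw [if_neg hb, ih]
      simp only [List.mem_cons]
      constructor
      · rintro (h | ⟨q, hq, hp, hx⟩)
        · exact Or.inl h
        · exact Or.inr ⟨q, Or.inr hq, hp, hx⟩
      · rintro (h | ⟨q, rfl | hq, hp, hx⟩)
        · exact Or.inl h
        · exact absurd hp hb
        · exact Or.inr ⟨q, hq, hp, hx⟩

theorem outerMem (p : List (Int × String × Int × String)) (er : Int) (I : List Int) (s : PySem.Set Int) (x : Int) :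
    x ∈ I.foldl (fun s i =>
        let pi := PySem.List.pyGetD p i (0, "", 0, "")
        (PySem.List.slice p (some (i + 1)) none).foldl (fun s leti =>
          if (pvPar pi leti er).isSome then PySem.Set.add (PySem.Set.add s pi.1) leti.1 else s) s) s
      ↔ x ∈ s ∨ ∃ i ∈ I, ∃ q ∈ PySem.List.slice p (some (i + 1)) none,
          (pvPar (PySem.List.pyGetD p i (0, "", 0, "")) q er).isSome
          ∧ (x = (PySem.List.pyGetD p i (0, "", 0, "")).1 ∨ x = q.1) := by
  induction I generalizing s with
  | nil => simp
  | cons i t ih =>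
    simp only [List.foldl_cons, ih, innerMem, List.mem_cons]
    constructor
    · rintro ((h | hq) | ⟨j, hj, hq⟩)
      · exact Or.inl h
      · exact Or.inr ⟨i, Or.inl rfl, hq⟩
      · exact Or.inr ⟨j, Or.inr hj, hq⟩
    · rintro (h | ⟨j, rfl | hj, hq⟩)
      · exact Or.inl (Or.inl h)
      · exact Or.inl (Or.inr hq)
      · exact Or.inr ⟨j, hj, hq⟩

theorem mem_imaPar (p : List (Int × String × Int × String)) (er : Int) (x : Int) :
    x ∈ pvImaPar p er ↔ ∃ (i : Nat) (hi : i < p.length), ∃ q ∈ p.drop (i + 1),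
      (pvPar p[i] q er).isSome ∧ (x = p[i].1 ∨ x = q.1) := by
  rw [pvImaPar, outerMem]
  simp only [PySem.Set.empty]
  constructor
  · rintro (h | ⟨i, hmem, q, hq, hp, hx⟩)
    · simp at h
    · obtain ⟨h0, h1⟩ := PySem.List.mem_pyRange_one.mp hmem
      refine ⟨i.toNat, by omega, q, ?_, ?_, ?_⟩
      · rwa [PySem.List.slice_from p (by omega : (0:Int) ≤ i + 1), (by omega : (i+1).toNat = i.toNat + 1)] at hq
      · rwa [PySem.List.pyGetD_eq_getElem p _ h0 h1] at hp
      · rwa [PySem.List.pyGetD_eq_getElem p _ h0 h1] at hx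
  · rintro ⟨i, hi, q, hq, hp, hx⟩
    refine Or.inr ⟨(i : Int), PySem.List.mem_pyRange_one.mpr (by omega), q, ?_, ?_, ?_⟩
    · rwa [PySem.List.slice_from p (by omega : (0:Int) ≤ (i:Int) + 1), (by omega : ((i:Int)+1).toNat = i + 1)]
    · rw [PySem.List.pyGetD_eq_getElem p _ (by omega) (by exact_mod_cast hi)]
      simpa using hp
    · rw [PySem.List.pyGetD_eq_getElem p _ (by omega) (by exact_mod_cast hi)]
      simpa using hx

theorem mem_drop_of_lt_index (p : List (Int × String × Int × String)) (i j : Nat) (hj : j < p.length) (hij : i + 1 ≤ j) :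
    p[j] ∈ p.drop (i + 1) := by
  have hlen : j - (i + 1) < (p.drop (i + 1)).length := by simp [List.length_drop]; omega
  have : (p.drop (i + 1))[j - (i + 1)] = p[j] := by
    rw [List.getElem_drop]; congr 1; omega
  rw [← this]; exact List.getElem_mem hlen

theorem mem_imaPar_iff_hasPartner (p : List (Int × String × Int × String)) (er : Int)
    (hnd : (p.map (fun e => e.1)).Nodup) (e : Int × String × Int × String) (he : e ∈ p) :
    e.1 ∈ pvImaPar p er ↔ ∃ q ∈ p, (pvPar e q er).isSome = true := by
  rw [mem_imaPar]
  constructor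
  · rintro ⟨i, hi, q, hq, hp, hx | hx⟩
    · have : e = p[i] := List.inj_on_of_nodup_map hnd he (List.getElem_mem hi) hx
      exact ⟨q, List.mem_of_mem_drop hq, this ▸ hp⟩
    · have : e = q := List.inj_on_of_nodup_map hnd he (List.mem_of_mem_drop hq) hx
      subst this
      exact ⟨p[i], List.getElem_mem hi, by rw [pvPar_isSome_symm]; exact hp⟩
  · rintro ⟨q, hq, hp⟩
    obtain ⟨i, hi, hie⟩ := List.getElem_of_mem he
    obtain ⟨j, hj, hjq⟩ := List.getElem_of_mem hq
    have hne : e ≠ q := by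
      intro h
      have := (pvPar_isSome_iff e q er).mp hp
      exact this.1 (by rw [h])
    have hij : i ≠ j := by intro h; subst h; exact hne (by rw [← hie, ← hjq])
    rcases Nat.lt_or_ge i j with hlt | hge
    · exact ⟨i, hi, q, hjq ▸ mem_drop_of_lt_index p i j hj (by omega), hie ▸ hp,
        Or.inl (by rw [hie])⟩
    · have hlt : j + 1 ≤ i := by omega
      refine ⟨j, hj, e, hie ▸ mem_drop_of_lt_index p j i hi hlt, ?_, Or.inr rfl⟩
      rw [hjq, pvPar_isSome_symm]
      exact hp

theorem countP_eq_of_split {α : Type} (p : α → Bool) (l : List α) (k : Nat) (hk : k ≤ l.length)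
    (h1 : ∀ (j : Nat) (hj : j < l.length), j < k → p l[j])
    (h2 : ∀ (j : Nat) (hj : j < l.length), k ≤ j → ¬ p l[j]) :
    l.countP p = k := by
  induction l generalizing k with
  | nil => simp only [List.length_nil, Nat.le_zero] at hk; simp [hk]
  | cons a t ih =>
    cases k with
    | zero =>
      have : ∀ x ∈ a :: t, ¬ p x := by
        intro x hx
        obtain ⟨j, hj, hjx⟩ := List.getElem_of_mem hx
        exact hjx ▸ h2 j hj (by omega)
      simp [List.countP_eq_zero.mpr this]
    | succ k' =>
      have hpa : p a := h1 0 (by simp) (by omega)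
      have ht := ih k' (by simpa using hk)
        (fun j hj hlt => h1 (j+1) (by simpa using Nat.succ_lt_succ hj) (by omega))
        (fun j hj hge => h2 (j+1) (by simpa using Nat.succ_lt_succ hj) (by omega))
      simp [hpa, ht]

theorem bisectLeft_count (xs : List Int) (x : Int) (h : xs.Pairwise (· ≤ ·)) :
    PySem.List.bisectLeft xs x = xs.countP (fun v => decide (v < x)) := by
  obtain ⟨hle, hlt, hge⟩ := PySem.List.bisectLeft_spec xs x h
  exact (countP_eq_of_split _ xs _ hle
    (fun j hj hl => by simpa using hlt j hj hl)
    (fun j hj hg => by simpa using not_lt.mpr (hge j hj hg))).symm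

theorem bisectRight_count (xs : List Int) (x : Int) (h : xs.Pairwise (· ≤ ·)) :
    PySem.List.bisectRight xs x = xs.countP (fun v => decide (v ≤ x)) := by
  obtain ⟨hle, hlt, hge⟩ := PySem.List.bisectRight_spec xs x h
  exact (countP_eq_of_split _ xs _ hle
    (fun j hj hl => by simpa using hlt j hj hl)
    (fun j hj hg => by simpa using not_le.mpr (hge j hj hg))).symm

theorem countP_window_split (L : List Int) (lo hi : Int) (h : lo ≤ hi) :
    L.countP (fun v => decide (v ≤ hi))
      = L.countP (fun v => decide (v < lo)) + L.countP (fun v => decide (lo ≤ v) && decide (v ≤ hi)) := by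
  induction L with
  | nil => simp
  | cons a t ih =>
    simp only [List.countP_cons, ih]
    by_cases h1 : a ≤ hi <;> by_cases h2 : a < lo <;> by_cases h3 : lo ≤ a <;>
      simp [h1, h2, h3] <;> omega

theorem window_count (L : List Int) (lo hi : Int) (h : lo ≤ hi) :
    (PySem.List.bisectRight (PySem.List.sorted L (fun x => x) false) hi : Int)
      - (PySem.List.bisectLeft (PySem.List.sorted L (fun x => x) false) lo : Int)
      = (L.countP (fun v => decide (lo ≤ v) && decide (v ≤ hi)) : Int) := by
  have hp : (PySem.List.sorted L (fun x => x) false).Pairwise (· ≤ ·) := by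
    simpa using PySem.List.sorted_pairwise L (fun x => x)
  have hperm := PySem.List.sorted_perm L (fun x => x) false
  rw [bisectRight_count _ _ hp, bisectLeft_count _ _ hp,
    hperm.countP_eq, hperm.countP_eq, countP_window_split L lo hi h]
  push_cast
  omega

theorem bySex0_getD (p : List (Int × String × Int × String)) (s : String) :
    (pvBySex0 p).getD s []
      = ((p.map (fun e => (e.2.2.2, e.2.2.1))).filter (fun q => q.1 == s)).map (fun q => q.2) := by
  rw [pvBySex0, PySem.Dict.getD_foldl_modify_append]
  simp

theorem nodup_keys_bySex0 (p : List (Int × String × Int × String)) : (pvBySex0 p).keys.Nodup := by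
  exact PySem.Dict.nodup_keys_foldl_modify_key
    (p.map (fun e => (e.2.2.2, e.2.2.1))) (fun q => q.1) []
    (fun _ q l => l ++ [q.2]) PySem.Dict.empty PySem.Dict.nodup_keys_empty

theorem bySex_items (p : List (Int × String × Int × String)) :
    (pvBySex p).items = (pvBySex0 p).items.map
      (fun q => (q.1, PySem.List.sorted q.2 (fun x => x) false)) := by
  rw [pvBySex, PySem.Dict.items_foldl_insert_fresh _ _ _ _ (by simp [PySem.Dict.empty])
    (by simpa [PySem.Dict.keys] using nodup_keys_bySex0 p)]
  simp [PySem.Dict.empty]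

theorem bySex_getD (p : List (Int × String × Int × String)) (s : String) :
    (pvBySex p).getD s [] = PySem.List.sorted ((pvBySex0 p).getD s []) (fun x => x) false := by
  by_cases hc : (pvBySex0 p).contains s
  · obtain ⟨L, hL⟩ : ∃ L, (pvBySex0 p).get? s = some L := by
      rw [← Option.isSome_iff_exists]
      rwa [← PySem.Dict.contains_eq_isSome_get?]
    have hmem : (s, L) ∈ (pvBySex0 p).items := PySem.Dict.mem_items_of_get?_eq_some _ hL
    have hmem2 : (s, PySem.List.sorted L (fun x => x) false) ∈ (pvBySex p).items := by
      rw [bySex_items]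
      exact List.mem_map_of_mem hmem
    have hnd2 : (pvBySex p).keys.Nodup := by
      have := nodup_keys_bySex0 p
      simp only [PySem.Dict.keys, bySex_items] at *
      simpa [List.map_map, Function.comp_def] using this
    rw [PySem.Dict.getD_of_mem_items _ hmem2 hnd2 [],
      PySem.Dict.getD_of_get?_eq_some _ [] hL]
  · have h0 : (pvBySex0 p).getD s [] = [] :=
      PySem.Dict.getD_of_not_contains (pvBySex0 p) (d0 := []) (by simpa using hc)
    have hc2 : (pvBySex p).contains s = false := by
      rw [← Bool.not_eq_true, PySem.Dict.contains_iff_mem_keys]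
      have : (pvBySex p).keys = (pvBySex0 p).keys := by
        simp [PySem.Dict.keys, bySex_items, List.map_map, Function.comp_def]
      rw [this, ← PySem.Dict.contains_iff_mem_keys]
      simpa using hc
    rw [PySem.Dict.getD_of_not_contains (pvBySex p) (d0 := []) hc2, h0]
    rfl

theorem res_fold (p : List (Int × String × Int × String)) (er : Int) :
    (List.foldl (fun r e =>
      if (((PySem.List.bisectRight (PySem.List.sorted (p.map (fun e => e.2.2.1)) (fun x => x) false) (e.2.2.1 + er) : Int)
            - (PySem.List.bisectLeft (PySem.List.sorted (p.map (fun e => e.2.2.1)) (fun x => x) false) (e.2.2.1 - er) : Int))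
          == ((PySem.List.bisectRight ((pvBySex p).getD e.2.2.2 []) (e.2.2.1 + er) : Int)
            - (PySem.List.bisectLeft ((pvBySex p).getD e.2.2.2 []) (e.2.2.1 - er) : Int))) = true
      then r ++ [e.1] else r) ([] : List Int) p)
    = [] ++ (p.filter (fun e =>
        ((PySem.List.bisectRight (PySem.List.sorted (p.map (fun e => e.2.2.1)) (fun x => x) false) (e.2.2.1 + er) : Int)
            - (PySem.List.bisectLeft (PySem.List.sorted (p.map (fun e => e.2.2.1)) (fun x => x) false) (e.2.2.1 - er) : Int))
          == ((PySem.List.bisectRight ((pvBySex p).getD e.2.2.2 []) (e.2.2.1 + er) : Int)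
            - (PySem.List.bisectLeft ((pvBySex p).getD e.2.2.2 []) (e.2.2.1 - er) : Int)))).map (fun e => e.1) :=
  PySem.List.foldl_append_if _ _ p []

theorem cond_iff (p : List (Int × String × Int × String)) (er : Int) (her : 0 ≤ er)
    (e : Int × String × Int × String) :
    (((PySem.List.bisectRight (PySem.List.sorted (p.map (fun x => x.2.2.1)) (fun x => x) false) (e.2.2.1 + er) : Int)
        - (PySem.List.bisectLeft (PySem.List.sorted (p.map (fun x => x.2.2.1)) (fun x => x) false) (e.2.2.1 - er) : Int))
      == ((PySem.List.bisectRight ((pvBySex p).getD e.2.2.2 []) (e.2.2.1 + er) : Int)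
        - (PySem.List.bisectLeft ((pvBySex p).getD e.2.2.2 []) (e.2.2.1 - er) : Int))) = true
      ↔ ∀ q ∈ p, ¬ ((pvPar e q er).isSome = true) := by
  have hlh : e.2.2.1 - er ≤ e.2.2.1 + er := by omega
  rw [beq_iff_eq, bySex_getD, bySex0_getD,
    window_count (p.map (fun x => x.2.2.1)) _ _ hlh,
    window_count _ _ _ hlh]
  simp only [List.filter_map, List.countP_map, List.map_map, Function.comp_def]
  rw [← (List.filter_append_perm (fun x => x.2.2.2 == e.2.2.2) p).countP_eq
      (p := fun x => decide (e.2.2.1 - er ≤ x.2.2.1) && decide (x.2.2.1 ≤ e.2.2.1 + er)),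
    List.countP_append]
  rw [Int.natCast_inj]
  constructor
  · intro h q hq hps
    obtain ⟨hne, habs⟩ := (pvPar_isSome_iff e q er).mp hps
    have h0 : (p.filter (fun x => !(x.2.2.2 == e.2.2.2))).countP
        (fun x => decide (e.2.2.1 - er ≤ x.2.2.1) && decide (x.2.2.1 ≤ e.2.2.1 + er)) = 0 := by omega
    rw [List.countP_eq_zero] at h0
    have hqf : q ∈ p.filter (fun x => !(x.2.2.2 == e.2.2.2)) := by
      rw [List.mem_filter]
      exact ⟨hq, by simp [Ne.symm hne]⟩
    have := h0 q hqf
    rw [abs_sub_le_iff] at habs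
    simp at this
    omega
  · intro h
    have h0 : (p.filter (fun x => !(x.2.2.2 == e.2.2.2))).countP
        (fun x => decide (e.2.2.1 - er ≤ x.2.2.1) && decide (x.2.2.1 ≤ e.2.2.1 + er)) = 0 := by
      rw [List.countP_eq_zero]
      intro q hqf
      rw [List.mem_filter] at hqf
      obtain ⟨hq, hne⟩ := hqf
      have := h q hq
      rw [pvPar_isSome_iff] at this
      simp only [not_and] at this
      have hne' : e.2.2.2 ≠ q.2.2.2 := by
        intro hcontra
        simp [hcontra] at hne
      have := this hne'
      rw [abs_sub_le_iff] at this
      simp only [Bool.and_eq_true, decide_eq_true_eq, not_and, not_le]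
      omega
    omega

theorem brez_para_main : ∀ (plesalci : List (Int × String × Int × String)) (erlaubt : Int), Pre_brez_para plesalci erlaubt → brez_para plesalci erlaubt = brez_para_alt plesalci erlaubt := by
  intro p er hpre
  unfold Pre_brez_para at hpre
  by_cases her : er < 0
  · have hnone : ∀ x, x ∉ pvImaPar p er := by
      intro x hx
      rw [mem_imaPar] at hx
      obtain ⟨i, hi, q, hq, hp, _⟩ := hx
      obtain ⟨_, habs⟩ := (pvPar_isSome_iff _ _ _).mp hp
      have := abs_nonneg (p[i].2.2.1 - q.2.2.1)
      omega
    rw [brez_para, brez_para_alt, if_pos her, PySem.Set.diff, List.filter_eq_self]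
    intro a _
    simp only [Bool.not_eq_eq_eq_not, Bool.not_true]
    rw [← Bool.not_eq_true, PySem.Set.contains_iff]
    exact hnone a
  · push_neg at her
    rw [brez_para]
    simp only [brez_para_alt, if_neg (not_lt.mpr her)]
    rw [res_fold p er]
    have hndres : ∀ q : (Int × String × Int × String) → Bool,
        ((p.filter q).map (fun e => e.1)).Nodup :=
      fun q => List.Nodup.sublist (List.Sublist.map _ List.filter_sublist) hpre
    rw [List.nil_append, PySem.Set.ofList_eq_self_of_nodup _ (hndres _),
      PySem.Set.ofList_eq_self_of_nodup _ hpre,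
      PySem.Set.diff, List.filter_map]
    congr 1
    apply List.filter_congr
    intro e he
    rw [Bool.eq_iff_iff]
    simp only [Function.comp_apply]
    rw [Bool.not_eq_eq_eq_not, Bool.not_true, ← Bool.not_eq_true, PySem.Set.contains_iff]
    rw [mem_imaPar_iff_hasPartner p er hpre e he, cond_iff p er her e]
    push_neg
    simp

-- ===== VERDICT (by name: the statement is the Claim_ definition above) =====
theorem brez_para_spec : Claim_equal_brez_para := by
  intro p er _ hpre
  exact brez_para_main p er hpre
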